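-- pv_equiv track=rewrite | github.com/soham1993/Data-structures-algorithms | Solvingminisudoku.py | solve
-- ===== SOURCE A (Python) =====
-- def findoccur(arr,l):
--     for i in range(0,3):
--         for j in range(0,3):
--             if arr[i][j]==0:
--                 l[0]=i
--                 l[1]=j
--                 return True
--     return False
--
-- def findrow(arr,row,num):
--     for i in range(0,3):
--         if arr[row][i]==num:
--             return True
--     return False
--
-- def findcol(arr,col,num):
--
--       for i in range(0,3):
--
--           if arr[i][col]==num:
--               return True
--       return False
--
-- def check_location_eligible(arr,row,col,num):
--     return not findrow(arr,row,num) and not findcol(arr,col,num)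
--
-- def solve(arr):
--     l=[0,0]
--     if not findoccur(arr,l):
--          return True
--     row=l[0]
--     col=l[1]
--
--     for num in range(1,4):
--         if check_location_eligible(arr,row,col,num) is True:
--             arr[row][col]=num
--
--             if(solve(arr)):
--                 return True
--             arr[row][col]=0
--     """this triggers backtracking"""
--     return False
-- ===== SOURCE B (Python) =====
-- def solve(arr):
--     # Different decomposition: precompute the empty cells once and backtrack over
--     # that list, instead of rescanning the whole grid for the first zero at every
--     # recursive call. Mutates arr like the original (solved grid / zeros restored).
--     empties = [(i, j) for i in range(3) for j in range(3) if arr[i][j] == 0]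
--
--     def fill(k):
--         if k == len(empties):
--             return True
--         r, c = empties[k]
--         for num in range(1, 4):
--             if all(arr[r][t] != num for t in range(3)) and all(arr[t][c] != num for t in range(3)):
--                 arr[r][c] = num
--                 if fill(k + 1):
--                     return True
--                 arr[r][c] = 0
--         return False
--
--     return fill(0)
-- ===== Notes on version B (the rewrite author's own statement) =====
-- stated objective: alternative
-- what changed: B precomputes the list of empty cells once and backtracks structurally over that list with a single combined row+column check, instead of rescanning the whole grid for the first zero (and two separate scans) at every recursive call.
-- outside the precondition, e.g. on solve([[0, 1, 2], [3]]): A returns False, B raises IndexError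
import Mathlib
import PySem

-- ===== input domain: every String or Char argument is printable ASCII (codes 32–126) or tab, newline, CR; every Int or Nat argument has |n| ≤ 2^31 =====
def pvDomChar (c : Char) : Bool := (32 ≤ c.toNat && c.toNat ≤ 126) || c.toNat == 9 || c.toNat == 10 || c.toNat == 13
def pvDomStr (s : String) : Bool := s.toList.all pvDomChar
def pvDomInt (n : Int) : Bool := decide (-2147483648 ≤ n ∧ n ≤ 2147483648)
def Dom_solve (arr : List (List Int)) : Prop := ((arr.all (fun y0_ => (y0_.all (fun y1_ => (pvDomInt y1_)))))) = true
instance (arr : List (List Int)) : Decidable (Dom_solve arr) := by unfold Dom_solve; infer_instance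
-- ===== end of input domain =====

-- B backtracks over a once-precomputed list of empty cells instead of rescanning the grid
-- for the first zero at every recursive call; both Pythons mutate `arr` identically (solved
-- grid on True, zeros restored on False) — the equivalence proved here is about the return value.


-- ===== PORT A =====
-- shared helper: the nine positions in the row-major order of `for i in range(0,3): for j in range(0,3)`
def pos9 : List (Nat × Nat) := [(0,0),(0,1),(0,2),(1,0),(1,1),(1,2),(2,0),(2,1),(2,2)]

-- arr[i][j]; exact for in-range i, j (all accesses use 0 ≤ i,j ≤ 2; Pre_solve guarantees the range,
-- outside it Python raises IndexError)
def cell (g : List (List Int)) (i j : Nat) : Int := (g.getD i []).getD j 0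

-- arr[row][col] = v  (in-place row update; exact for in-range row, col)
def setCell (g : List (List Int)) (i j : Nat) (v : Int) : List (List Int) :=
  g.set i ((g.getD i []).set j v)

-- findoccur: first (i, j) in row-major order with arr[i][j] == 0 (the early `return True` with l=[i,j])
def findoccur (g : List (List Int)) : Option (Nat × Nat) :=
  pos9.find? (fun p => cell g p.1 p.2 == 0)

def findrow (g : List (List Int)) (row : Nat) (num : Int) : Bool :=
  (List.range 3).any (fun i => cell g row i == num)

def findcol (g : List (List Int)) (col : Nat) (num : Int) : Bool :=
  (List.range 3).any (fun i => cell g i col == num)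

def check_location_eligible (g : List (List Int)) (row col : Nat) (num : Int) : Bool :=
  !findrow g row num && !findcol g col num

-- solve: the recursion threads the mutated grid explicitly; fuel only guards totality
-- (depth ≤ empties+1 ≤ 10, never exhausted on inputs satisfying Pre_solve)
mutual
def solveAux : Nat → List (List Int) → Bool × List (List Int)
  | 0, g => (false, g)
  | fuel+1, g =>
    match findoccur g with
    | none => (true, g)
    | some (row, col) => tryNums fuel row col [1, 2, 3] g
  termination_by fuel _ => 5 * fuel
  decreasing_by all_goals first | omega | (simp only [List.length_cons, List.length_nil]; omega)
def tryNums : Nat → Nat → Nat → List Int → List (List Int) → Bool × List (List Int)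
  | _, _, _, [], g => (false, g)
  | fuel, row, col, n :: ns, g =>
    if check_location_eligible g row col n then
      let r := solveAux fuel (setCell g row col n)
      if r.1 then (true, r.2)
      else tryNums fuel row col ns (setCell r.2 row col 0)
    else tryNums fuel row col ns g
  termination_by fuel _ _ ns _ => 5 * fuel + ns.length + 1
  decreasing_by all_goals first | omega | (simp only [List.length_cons, List.length_nil]; omega)
end

def solve (arr : List (List Int)) : Bool := (solveAux 10 arr).1

-- ===== PORT B =====
-- empties = [(i, j) for i in range(3) for j in range(3) if arr[i][j] == 0]
def empties (g : List (List Int)) : List (Nat × Nat) :=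
  pos9.filter (fun p => cell g p.1 p.2 == 0)

-- all(arr[r][t] != num for t in range(3)) and all(arr[t][c] != num for t in range(3))
def okB (g : List (List Int)) (r c : Nat) (num : Int) : Bool :=
  (List.range 3).all (fun t => cell g r t != num) && (List.range 3).all (fun t => cell g t c != num)

-- fill(k): structural recursion over the remaining empty-cell list (no rescans, no fuel)
mutual
def fill : List (List Int) → List (Nat × Nat) → Bool × List (List Int)
  | g, [] => (true, g)
  | g, (r, c) :: rest => tryFill g r c rest [1, 2, 3]
  termination_by _ l => 5 * l.length
  decreasing_by all_goals first | omega | (simp only [List.length_cons, List.length_nil]; omega)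
def tryFill : List (List Int) → Nat → Nat → List (Nat × Nat) → List Int → Bool × List (List Int)
  | g, _, _, _, [] => (false, g)
  | g, r, c, rest, n :: ns =>
    if okB g r c n then
      let res := fill (setCell g r c n) rest
      if res.1 then (true, res.2)
      else tryFill (setCell res.2 r c 0) r c rest ns
    else tryFill g r c rest ns
  termination_by _ _ _ rest ns => 5 * rest.length + ns.length + 1
  decreasing_by all_goals first | omega | (simp only [List.length_cons, List.length_nil]; omega)
end

def solve_alt (arr : List (List Int)) : Bool := (fill arr (empties arr)).1

-- ===== PRECONDITION & SPEC =====
-- Pre_solve is the natural 3×3 domain: at least 3 rows, the first three of length ≥ 3.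
-- On malformed grids A almost always raises IndexError, but short-circuit evaluation can let it
-- return False before reaching a missing cell; those accidental returns are excluded too (B raises there).
def Pre_solve (arr : List (List Int)) : Prop :=
  2 < arr.length ∧ 2 < (arr.getD 0 []).length ∧ 2 < (arr.getD 1 []).length ∧ 2 < (arr.getD 2 []).length
instance (arr : List (List Int)) : Decidable (Pre_solve arr) := by unfold Pre_solve; infer_instance

def pvWitness_solve : List (List Int) := [[0, 0, 0], [0, 2, 0], [0, 0, 1]]

def Spec_solve (arr : List (List Int)) (out : Bool) : Prop := out = solve_alt arr
instance (arr : List (List Int)) (out : Bool) : Decidable (Spec_solve arr out) := by unfold Spec_solve; infer_instance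

-- ===== CLAIM (what is proved, stated in full; the proofs are below) =====
def Claim_equal_solve : Prop := ∀ (arr : List (List Int)), Dom_solve arr → Pre_solve arr → Spec_solve arr (solve arr)

-- ===== LEMMAS AND PROOFS =====

theorem cell_setCell (g : List (List Int)) {r c : Nat} (hr : r < g.length)
    (hc : c < (g.getD r []).length) (v : Int) (i j : Nat) :
    cell (setCell g r c v) i j = if r = i ∧ c = j then v else cell g i j := by
  unfold cell setCell
  by_cases hri : r = i
  · subst hri
    by_cases hcj : c = j
    · subst hcj
      simp only [List.getD_eq_getElem?_getD, List.getElem?_set]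
      rw [List.getD_eq_getElem?_getD, List.getElem?_eq_getElem hr, Option.getD_some] at hc
      simp [hr, hc]
    · simp only [List.getD_eq_getElem?_getD, List.getElem?_set]
      simp [hr, hcj]
  · simp only [List.getD_eq_getElem?_getD, List.getElem?_set, if_neg hri]
    simp [hri]

theorem length_setCell (g : List (List Int)) (r c : Nat) (v : Int) :
    (setCell g r c v).length = g.length := by
  simp [setCell]

theorem rowlen_setCell (g : List (List Int)) {r : Nat} (c : Nat) (hr : r < g.length) (v : Int) (i : Nat) :
    ((setCell g r c v).getD i []).length = (g.getD i []).length := by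
  unfold setCell
  by_cases hri : r = i
  · subst hri
    rw [List.getD_eq_getElem?_getD, List.getElem?_set_self hr, Option.getD_some, List.length_set]
  · rw [List.getD_eq_getElem?_getD, List.getElem?_set_ne hri, ← List.getD_eq_getElem?_getD]

theorem pre_setCell {g : List (List Int)} (h : Pre_solve g) {r : Nat} (c : Nat)
    (hr : r < g.length) (v : Int) : Pre_solve (setCell g r c v) := by
  obtain ⟨h0, h1, h2, h3⟩ := h
  refine ⟨?_, ?_, ?_, ?_⟩ <;>
    simp only [length_setCell, rowlen_setCell g c hr v] <;> assumption

theorem setCell_restore {g : List (List Int)} {r c : Nat} (hr : r < g.length)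
    (hc : c < (g.getD r []).length) (h0 : cell g r c = 0) (n : Int) :
    setCell (setCell g r c n) r c 0 = g := by
  have hrow : g.getD r [] = g[r] := by
    rw [List.getD_eq_getElem?_getD, List.getElem?_eq_getElem hr, Option.getD_some]
  have hc' : c < g[r].length := hrow ▸ hc
  have h0' : g[r][c] = 0 := by
    unfold cell at h0
    rw [hrow, List.getD_eq_getElem?_getD, List.getElem?_eq_getElem hc', Option.getD_some] at h0
    exact h0
  apply List.ext_getElem?
  intro i
  unfold setCell
  simp only [List.getElem?_set, List.length_set]
  by_cases hri : r = i
  · subst hri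
    simp only [if_pos hr]
    rw [List.getD_eq_getElem?_getD, List.getElem?_set_self hr, Option.getD_some, hrow,
      List.set_set]
    simp only [if_true]
    rw [show (0 : Int) = g[r][c] from h0'.symm, List.set_getElem_self hc',
      List.getElem?_eq_getElem hr]
  · simp [hri]

theorem mem_pos9_range {r c : Nat} (h : (r, c) ∈ pos9) : r < 3 ∧ c < 3 := by
  fin_cases h <;> simp

theorem pre_cell_range {g : List (List Int)} (hp : Pre_solve g) {r c : Nat}
    (h : (r, c) ∈ pos9) : r < g.length ∧ c < (g.getD r []).length := by
  obtain ⟨h0, h1, h2, h3⟩ := hp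
  obtain ⟨hr3, hc3⟩ := mem_pos9_range h
  constructor
  · omega
  · interval_cases r <;> omega

theorem pos9_nodup : pos9.Nodup := by decide

-- filter of a nodup list after the head's predicate value flips to false: head drops, tail unchanged
theorem filter_flip_head {α : Type} [DecidableEq α] {l : List α} (hnd : l.Nodup)
    {p q : α → Bool} {a : α} {rest : List α}
    (hf : l.filter p = a :: rest) (hqa : q a = false)
    (hpq : ∀ x, x ≠ a → q x = p x) : l.filter q = rest := by
  rw [List.filter_eq_cons_iff] at hf
  obtain ⟨l₁, l₂, rfl, hl₁, hpa, hl₂⟩ := hf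
  have hnd' := hnd
  rw [List.nodup_append] at hnd'
  have hal₁ : a ∉ l₁ := fun hm => hnd'.2.2 a hm a (by simp) rfl
  have hal₂ : a ∉ l₂ := (List.nodup_cons.mp hnd'.2.1).1
  rw [List.filter_append, List.filter_cons]
  have e1 : l₁.filter q = [] := by
    rw [List.filter_eq_nil_iff]
    intro x hx
    rw [hpq x (fun he => hal₁ (he ▸ hx))]
    exact hl₁ x hx
  have e2 : l₂.filter q = rest := by
    rw [← hl₂]
    apply List.filter_congr
    intro x hx
    exact hpq x (fun he => hal₂ (he ▸ hx))
  rw [e1, hqa, e2]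
  simp

theorem empties_setCell {g : List (List Int)} (hp : Pre_solve g) {r c : Nat} {rest : List (Nat × Nat)}
    (he : empties g = (r, c) :: rest) {n : Int} (hn : n ≠ 0) :
    empties (setCell g r c n) = rest := by
  have hmem : (r, c) ∈ pos9 := by
    have : (r, c) ∈ empties g := by rw [he]; simp
    exact List.mem_of_mem_filter this
  obtain ⟨hr, hc⟩ := pre_cell_range hp hmem
  unfold empties at he ⊢
  refine filter_flip_head pos9_nodup he ?_ ?_
  · simp [cell_setCell g hr hc n r c, hn]
  · intro x hx
    rw [cell_setCell g hr hc n x.1 x.2]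
    have : ¬(r = x.1 ∧ c = x.2) := by
      intro ⟨h1, h2⟩
      exact hx (by cases x; simp_all)
    simp [this]

theorem cell_head_empties {g : List (List Int)} {r c : Nat} {rest : List (Nat × Nat)}
    (he : empties g = (r, c) :: rest) : cell g r c = 0 := by
  have : (r, c) ∈ empties g := by rw [he]; simp
  have := List.of_mem_filter this
  simpa using this

theorem mem_head_pos9 {g : List (List Int)} {r c : Nat} {rest : List (Nat × Nat)}
    (he : empties g = (r, c) :: rest) : (r, c) ∈ pos9 :=
  List.mem_of_mem_filter (by rw [he]; simp : (r, c) ∈ empties g)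

theorem findoccur_eq_head : ∀ g, findoccur g = (empties g).head? := by
  intro g
  unfold findoccur empties
  exact List.head?_filter.symm

theorem eligible_eq_okB (g : List (List Int)) (r c : Nat) (n : Int) :
    check_location_eligible g r c n = okB g r c n := by
  simp only [check_location_eligible, okB, findrow, findcol,
    show List.range 3 = [0, 1, 2] from rfl]
  simp [bne]

-- B restores the grid exactly when it fails (the `arr[r][c] = 0` resets)
theorem fill_restore : ∀ (l : List (Nat × Nat)) (g : List (List Int)), Pre_solve g →
    empties g = l → (fill g l).1 = false → (fill g l).2 = g := by
  intro l
  induction l with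
  | nil => intro g _ _ h; rw [fill] at h; simp at h
  | cons p rest ih =>
    obtain ⟨r, c⟩ := p
    intro g hp he
    rw [show fill g ((r, c) :: rest) = tryFill g r c rest [1, 2, 3] by rw [fill]]
    have key : ∀ (ns : List Int), (∀ n ∈ ns, n ≠ 0) →
        (tryFill g r c rest ns).1 = false → (tryFill g r c rest ns).2 = g := by
      intro ns
      induction ns with
      | nil => intro _ _; rw [tryFill]
      | cons n ns ihn =>
        intro hns hf
        rw [tryFill] at hf ⊢
        by_cases hok : okB g r c n
        · simp only [hok, if_true] at hf ⊢
          set res := fill (setCell g r c n) rest with hres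
          by_cases hb : res.1
          · simp [hb] at hf
          · have hb' : res.1 = false := by simpa using hb
            rw [hb'] at hf ⊢
            simp only [Bool.false_eq_true, if_false] at hf ⊢
            have hn0 : n ≠ 0 := hns n (by simp)
            have hpre' : Pre_solve (setCell g r c n) :=
              pre_setCell hp c (pre_cell_range hp (mem_head_pos9 he)).1 n
            have hemp' : empties (setCell g r c n) = rest := empties_setCell hp he hn0
            have hres2 : res.2 = setCell g r c n := by
              rw [hres]
              exact ih (setCell g r c n) hpre' hemp' (by rw [← hres]; simpa using hb)
            obtain ⟨hr, hc⟩ := pre_cell_range hp (mem_head_pos9 he)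
            have hrestore : setCell res.2 r c 0 = g := by
              rw [hres2]
              exact setCell_restore hr hc (cell_head_empties he) n
            rw [hrestore] at hf ⊢
            exact ihn (fun m hm => hns m (by simp [hm])) hf
        · simp only [hok] at hf ⊢
          exact ihn (fun m hm => hns m (by simp [hm])) hf
    exact key [1, 2, 3] (by decide)

-- Main invariant: with the grid's empty-cell list as l and enough fuel, A's rescanning
-- recursion computes exactly B's structural recursion (grids included).
theorem solveAux_eq_fill : ∀ (l : List (Nat × Nat)) (fuel : Nat) (g : List (List Int)),
    Pre_solve g → empties g = l → l.length < fuel → solveAux fuel g = fill g l := by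
  intro l
  induction l with
  | nil =>
    intro fuel g _ he hlt
    obtain ⟨f, rfl⟩ : ∃ f, fuel = f + 1 := ⟨fuel - 1, by omega⟩
    rw [solveAux, findoccur_eq_head, he, fill]
    simp
  | cons p rest ih =>
    obtain ⟨r, c⟩ := p
    intro fuel g hp he hlt
    obtain ⟨f, rfl⟩ : ∃ f, fuel = f + 1 := ⟨fuel - 1, by omega⟩
    rw [solveAux, findoccur_eq_head, he]
    simp only [List.head?_cons]
    rw [show fill g ((r, c) :: rest) = tryFill g r c rest [1, 2, 3] by rw [fill]]
    have key : ∀ (ns : List Int), (∀ n ∈ ns, n ≠ 0) →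
        tryNums f r c ns g = tryFill g r c rest ns := by
      intro ns
      induction ns with
      | nil => intro _; rw [tryNums, tryFill]
      | cons n ns ihn =>
        intro hns
        rw [tryNums, tryFill, eligible_eq_okB]
        by_cases hok : okB g r c n
        · simp only [hok, if_true]
          have hn0 : n ≠ 0 := hns n (by simp)
          have hpre' : Pre_solve (setCell g r c n) :=
            pre_setCell hp c (pre_cell_range hp (mem_head_pos9 he)).1 n
          have hemp' : empties (setCell g r c n) = rest := empties_setCell hp he hn0
          have heq : solveAux f (setCell g r c n) = fill (setCell g r c n) rest :=
            ih f (setCell g r c n) hpre' hemp' (by simp at hlt; omega)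
          rw [heq]
          set res := fill (setCell g r c n) rest
          by_cases hb : res.1
          · simp [hb]
          · have hb' : res.1 = false := by simpa using hb
            rw [hb']
            simp only [Bool.false_eq_true, if_false]
            have hres2 : res.2 = setCell g r c n :=
              fill_restore rest (setCell g r c n) hpre' hemp' hb'
            obtain ⟨hr2, hc2⟩ := pre_cell_range hp (mem_head_pos9 he)
            have hrestore : setCell res.2 r c 0 = g := by
              rw [hres2]; exact setCell_restore hr2 hc2 (cell_head_empties he) n
            rw [hrestore]
            exact ihn (fun m hm => hns m (by simp [hm]))
        · simp only [hok]
          exact ihn (fun m hm => hns m (by simp [hm]))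
    exact key [1, 2, 3] (by decide)

-- ===== VERDICT (by name: the statement is the Claim_ definition above) =====
theorem solve_spec : Claim_equal_solve := by
  intro arr _ hpre
  unfold Spec_solve solve solve_alt
  have hlen : (empties arr).length < 10 := by
    unfold empties
    have h := List.length_filter_le (fun p => cell arr p.1 p.2 == 0) pos9
    have h9 : pos9.length = 9 := by decide
    omega
  rw [solveAux_eq_fill (empties arr) 10 arr hpre rfl hlen]
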